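-- pv_equiv track=rewrite | github.com/hoclz/PopForm | app.py | combine_codes_to_label
-- ===== SOURCE A (Python) =====
-- from typing import List, Tuple, Dict, Optional
--
-- CODE_TO_BRACKET = {
--     1:"0-4",2:"5-9",3:"10-14",4:"15-19",5:"20-24",6:"25-29",7:"30-34",8:"35-39",9:"40-44",
--     10:"45-49",11:"50-54",12:"55-59",13:"60-64",14:"65-69",15:"70-74",16:"75-79",17:"80-84",18:"80+",
-- }
--
-- def combine_codes_to_label(codes: List[int]) -> str:
--     codes = sorted(set(int(c) for c in codes))
--     if not codes: return ""
--     lows, highs = [], []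
--     for c in codes:
--         s = CODE_TO_BRACKET.get(c, "")
--         if "-" in s:
--             a,b = s.split("-"); lows.append(int(a)); highs.append(int(b))
--         elif s.endswith("+"):
--             lows.append(int(s[:-1])); highs.append(999)
--     lo, hi = (min(lows), max(highs)) if lows else (None, None)
--     if lo is None: return "-".join(str(c) for c in codes)
--     return f"{lo}+" if hi >= 999 else f"{lo}-{hi}"
-- ===== SOURCE B (Python) =====
-- def combine_codes_to_label(codes):
--     # Arithmetic boundary extraction: code c (1..18) covers ages 5*(c-1)..5*(c-1)+4,
--     # except 18 which is 80+.  Because brackets grow with the code, the label is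
--     # determined by the smallest and largest valid codes alone.
--     cs = sorted(set(int(c) for c in codes))
--     if not cs:
--         return ""
--     valid = [c for c in cs if 1 <= c <= 18]
--     if not valid:
--         return "-".join(str(c) for c in cs)
--     v = valid[0]
--     lo = 80 if v == 18 else 5 * (v - 1)
--     c = valid[-1]
--     if c == 18:
--         return f"{lo}+"
--     return f"{lo}-{5 * (c - 1) + 4}"
-- ===== Notes on version B (the rewrite author's own statement) =====
-- stated objective: simpler
-- what changed: Replaces the runtime parsing of the bracket strings ('-'/'+' splitting) and the lows/highs accumulation with min/max by a closed arithmetic formula for each code's bounds and direct boundary extraction from the ends of the sorted valid-code list.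
import Mathlib
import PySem

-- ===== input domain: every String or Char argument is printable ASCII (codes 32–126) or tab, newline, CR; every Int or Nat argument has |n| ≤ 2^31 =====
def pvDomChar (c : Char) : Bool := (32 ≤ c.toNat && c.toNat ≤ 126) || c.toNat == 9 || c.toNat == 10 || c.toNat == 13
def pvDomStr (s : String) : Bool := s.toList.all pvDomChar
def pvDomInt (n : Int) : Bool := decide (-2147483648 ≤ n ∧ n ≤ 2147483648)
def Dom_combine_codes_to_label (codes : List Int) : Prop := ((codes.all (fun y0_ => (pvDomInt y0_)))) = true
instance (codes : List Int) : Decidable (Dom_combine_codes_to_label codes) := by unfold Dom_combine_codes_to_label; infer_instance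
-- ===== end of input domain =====

-- B replaces runtime parsing of the bracket strings and the lows/highs min/max aggregation by a
-- closed arithmetic formula for each code's bounds, read off the ends of the sorted valid codes (objective: simpler).

-- ===== PORT A =====
def pvBracketPairs : List (Int × String) :=
  [(1,"0-4"),(2,"5-9"),(3,"10-14"),(4,"15-19"),(5,"20-24"),(6,"25-29"),(7,"30-34"),(8,"35-39"),
   (9,"40-44"),(10,"45-49"),(11,"50-54"),(12,"55-59"),(13,"60-64"),(14,"65-69"),(15,"70-74"),
   (16,"75-79"),(17,"80-84"),(18,"80+")]

def PV_CODE_TO_BRACKET : PySem.Dict Int String := PySem.Dict.ofList pvBracketPairs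

-- the body of A's for-loop: parse the bracket string of c, append to lows/highs.
-- int(a)/int(b) act on the dict's literal digit strings and never raise; the `.getD 0` defaults and
-- the catch-all match arm are unreachable (s.split("-") has exactly two parts whenever "-" in s here).
def pvStepA (acc : List Int × List Int) (c : Int) : List Int × List Int :=
  let s := PV_CODE_TO_BRACKET.getD c ""
  if PySem.Str.isIn "-" s then
    match (PySem.Str.split? s "-").getD [] with
    | [a, b] => (acc.1 ++ [(PySem.Int.ofStr? a).getD 0], acc.2 ++ [(PySem.Int.ofStr? b).getD 0])
    | _ => acc
  else if PySem.Str.endswith s "+" then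
    (acc.1 ++ [(PySem.Int.ofStr? ((PySem.Str.slice? s none (some (-1)) 1).getD "")).getD 0], acc.2 ++ [999])
  else acc

-- A after the sorted(set(...)) line
def pvAcore (cs : List Int) : String :=
  if cs = [] then "" else
  let st := cs.foldl pvStepA ([], [])
  match PySem.List.min? st.1 (fun x => x), PySem.List.max? st.2 (fun x => x) with
  | some lo, some hi =>
      if hi ≥ 999 then PySem.Int.toStr lo ++ "+"
      else PySem.Int.toStr lo ++ "-" ++ PySem.Int.toStr hi
  | _, _ => PySem.Str.join "-" (cs.map PySem.Int.toStr)

def combine_codes_to_label (codes : List Int) : String :=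
  pvAcore (PySem.List.sorted (PySem.Set.ofList codes) (fun x => x) false)

-- ===== PORT B =====
-- B after the sorted(set(...)) line
def pvBcore (cs : List Int) : String :=
  if cs = [] then "" else
  let valid := cs.filter (fun c => decide (1 ≤ c ∧ c ≤ 18))
  match valid with
  | [] => PySem.Str.join "-" (cs.map PySem.Int.toStr)
  | v :: _ =>
    let lo : Int := if v = 18 then 80 else 5 * (v - 1)
    let c : Int := PySem.List.pyGetD valid (-1) 0
    if c = 18 then PySem.Int.toStr lo ++ "+"
    else PySem.Int.toStr lo ++ "-" ++ PySem.Int.toStr (5 * (c - 1) + 4)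

def combine_codes_to_label_alt (codes : List Int) : String :=
  pvBcore (PySem.List.sorted (PySem.Set.ofList codes) (fun x => x) false)

-- ===== PRECONDITION & SPEC =====
def Spec_combine_codes_to_label (codes : List Int) (out : String) : Prop := out = combine_codes_to_label_alt codes
instance (codes : List Int) (out : String) : Decidable (Spec_combine_codes_to_label codes out) := by unfold Spec_combine_codes_to_label; infer_instance

-- ===== CLAIM (what is proved, stated in full; the proofs are below) =====
def Claim_equal_combine_codes_to_label : Prop := ∀ (codes : List Int), Dom_combine_codes_to_label codes → Spec_combine_codes_to_label codes (combine_codes_to_label codes)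

-- ===== LEMMAS AND PROOFS =====

-- closed forms of the low/high bracket bounds A parses out of the strings
def pvLowF (c : Int) : Int := if c = 18 then 80 else 5 * (c - 1)
def pvHighF (c : Int) : Int := if c = 18 then 999 else 5 * (c - 1) + 4

lemma pvStepA_eq (acc : List Int × List Int) (c : Int) :
    pvStepA acc c = if 1 ≤ c ∧ c ≤ 18 then (acc.1 ++ [pvLowF c], acc.2 ++ [pvHighF c]) else acc := by
  by_cases h : 1 ≤ c ∧ c ≤ 18
  · rw [if_pos h]
    obtain ⟨h1, h2⟩ := h
    interval_cases c <;> rfl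
  · rw [if_neg h]
    have hnc : PV_CODE_TO_BRACKET.getD c "" = "" := by
      apply PySem.Dict.getD_of_not_contains
      rw [show PV_CODE_TO_BRACKET = { items := pvBracketPairs } from by decide,
        PySem.Dict.contains_mk]
      simp [pvBracketPairs]
      omega
    simp [pvStepA, hnc,
      show PySem.Chars.isIn ['-'] [] = false from by decide,
      show PySem.Chars.endswith [] ['+'] = false from by decide]

lemma pvFold (cs : List Int) (acc : List Int × List Int) :
    cs.foldl pvStepA acc =
      (acc.1 ++ (cs.filter (fun c => decide (1 ≤ c ∧ c ≤ 18))).map pvLowF,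
       acc.2 ++ (cs.filter (fun c => decide (1 ≤ c ∧ c ≤ 18))).map pvHighF) := by
  induction cs generalizing acc with
  | nil => simp
  | cons x t ih =>
    rw [List.foldl_cons, ih, pvStepA_eq]
    by_cases h : 1 ≤ x ∧ x ≤ 18 <;>
      simp [h]

lemma pvFoldlMinEq {a : Int} {l : List Int} (h : ∀ x ∈ l, a ≤ x) : l.foldl min a = a := by
  induction l generalizing a with
  | nil => rfl
  | cons x t ih =>
    rw [List.foldl_cons, min_eq_left (h x (by simp))]
    exact ih fun y hy => h y (by simp [hy])

lemma pvFoldlMaxLast {a : Int} {l : List Int} (h : (a :: l).Pairwise (· ≤ ·)) :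
    l.foldl max a = (a :: l).getLast (by simp) := by
  induction l generalizing a with
  | nil => rfl
  | cons x t ih =>
    have hax : a ≤ x := (List.pairwise_cons.mp h).1 x (by simp)
    rw [List.foldl_cons, max_eq_right hax, ih (List.pairwise_cons.mp h).2]
    exact (List.getLast_cons (by simp)).symm

lemma pvGetLastMap (f : Int → Int) (l : List Int) (h : l ≠ []) :
    (l.map f).getLast (by simpa using h) = f (l.getLast h) := by
  simp [List.getLast_eq_getElem]

theorem pvCore_eq (cs : List Int) (hch : cs.Pairwise (· < ·)) : pvAcore cs = pvBcore cs := by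
  by_cases hnil : cs = []
  · simp [pvAcore, pvBcore, hnil]
  · have hvmem : ∀ x ∈ cs.filter (fun c => decide (1 ≤ c ∧ c ≤ 18)), 1 ≤ x ∧ x ≤ 18 := by
      intro x hx
      simpa using List.of_mem_filter hx
    cases hv : cs.filter (fun c => decide (1 ≤ c ∧ c ≤ 18)) with
    | nil =>
      simp only [pvAcore, pvBcore, if_neg hnil, pvFold, hv]
      rfl
    | cons v t =>
      rw [hv] at hvmem
      have hvlt : (v :: t).Pairwise (· < ·) := hv ▸ hch.filter _
      have hvch : (v :: t).Pairwise (· ≤ ·) := hvlt.imp le_of_lt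
      have hLmem : (v :: t).getLast (by simp) ∈ v :: t := List.getLast_mem _
      have hLb : 1 ≤ (v :: t).getLast (by simp) ∧ (v :: t).getLast (by simp) ≤ 18 :=
        hvmem _ hLmem
      have hvb : 1 ≤ v ∧ v ≤ 18 := hvmem v (by simp)
      -- min of the lows is the low of the first valid code
      have hlow : PySem.List.min? ((v :: t).map pvLowF) (fun x => x) = some (pvLowF v) := by
        rw [List.map_cons, PySem.List.min?_id_cons]
        congr 1
        apply pvFoldlMinEq
        intro x hx
        obtain ⟨y, hy, rfl⟩ := List.mem_map.mp hx
        have hvy : v ≤ y := le_of_lt ((List.pairwise_cons.mp hvlt).1 y hy)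
        have hyb := hvmem y (by simp [hy])
        simp only [pvLowF]; split_ifs <;> omega
      -- max of the highs is the high of the last valid code
      have hhighPW : ((v :: t).map pvHighF).Pairwise (· ≤ ·) := by
        rw [List.pairwise_map]
        refine hvch.imp_of_mem ?_
        intro a b ha hb hab
        have hab2 := hvmem a ha
        have hbb := hvmem b hb
        simp only [pvHighF]; split_ifs <;> omega
      have hhigh : PySem.List.max? ((v :: t).map pvHighF) (fun x => x) =
          some (pvHighF ((v :: t).getLast (by simp))) := by
        rw [List.map_cons, PySem.List.max?_id_cons]
        rw [pvFoldlMaxLast (by simpa [List.map_cons] using hhighPW)]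
        congr 1
        exact pvGetLastMap pvHighF (v :: t) (by simp)
      have hge : pvHighF ((v :: t).getLast (by simp)) ≥ 999 ↔ (v :: t).getLast (by simp) = 18 := by
        simp only [pvHighF]; split_ifs <;> omega
      simp only [pvAcore, pvBcore, if_neg hnil, pvFold, hv, List.nil_append]
      simp only [hlow, hhigh]
      rw [PySem.List.pyGetD_neg_one _ _ (by simp)]
      by_cases hL : (v :: t).getLast (by simp) = 18
      · rw [if_pos (hge.mpr hL), if_pos hL]
        rfl
      · rw [if_neg (fun hc => hL (hge.mp hc)), if_neg hL]
        simp only [pvHighF, if_neg hL, pvLowF]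

-- ===== VERDICT (by name: the statement is the Claim_ definition above) =====
theorem combine_codes_to_label_spec : Claim_equal_combine_codes_to_label := by
  intro codes _
  unfold Spec_combine_codes_to_label combine_codes_to_label combine_codes_to_label_alt
  exact pvCore_eq _ (PySem.List.sorted_ofList_pairwise_lt codes)
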